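-- pv_equiv track=rewrite | github.com/imnuman/crpbot | libs/hydra/turbo_signal_generator.py | _get_asset_class
-- ===== SOURCE A (Python) =====
-- def _get_asset_class(asset: str) -> str:
--     """Determine asset class from asset name."""
--     asset_upper = asset.upper()
--     if any(x in asset_upper for x in ["BTC", "ETH", "SOL"]):
--         return "major_crypto"
--     elif any(x in asset_upper for x in ["DOGE", "SHIB", "PEPE"]):
--         return "meme"
--     elif any(x in asset_upper for x in ["LINK", "UNI", "AAVE"]):
--         return "defi"
--     else:
--         return "altcoin"
-- ===== SOURCE B (Python) =====
-- _KEYWORD_PRIORITY = {"BTC": 0, "ETH": 0, "SOL": 0,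
--                      "DOGE": 1, "SHIB": 1, "PEPE": 1,
--                      "LINK": 2, "UNI": 2, "AAVE": 2}
-- _CLASS_OF = {0: "major_crypto", 1: "meme", 2: "defi"}
--
-- def _get_asset_class(asset: str) -> str:
--     u = asset.upper()
--     best = 3
--     for i in range(len(u)):
--         for w in (3, 4):
--             p = _KEYWORD_PRIORITY.get(u[i:i + w])
--             if p is not None and p < best:
--                 best = p
--     return _CLASS_OF.get(best, "altcoin")
-- ===== Notes on version B (the rewrite author's own statement) =====
-- stated objective: alternative
-- what changed: Replaces A's per-keyword substring searches in an if/elif chain by a single left-to-right scan of the uppercased name that looks each 3- and 4-character window up in a keyword-to-priority dictionary, keeps the minimum priority seen, and maps it to the class at the end.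
import Mathlib
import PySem

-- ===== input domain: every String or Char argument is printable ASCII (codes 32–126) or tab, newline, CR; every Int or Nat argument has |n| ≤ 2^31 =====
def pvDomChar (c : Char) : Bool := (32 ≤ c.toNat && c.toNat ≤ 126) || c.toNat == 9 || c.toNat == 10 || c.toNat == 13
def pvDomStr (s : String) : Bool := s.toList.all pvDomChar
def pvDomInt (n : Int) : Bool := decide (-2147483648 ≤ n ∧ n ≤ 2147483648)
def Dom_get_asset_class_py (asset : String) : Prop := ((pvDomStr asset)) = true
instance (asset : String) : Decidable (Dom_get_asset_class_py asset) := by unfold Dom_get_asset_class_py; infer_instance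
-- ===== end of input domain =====

-- B replaces the per-keyword substring searches of A's if/elif chain by a single left-to-right
-- window scan of the uppercased name with a keyword→priority dictionary (objective: alternative).

-- ===== PORT A =====
-- A: literal if/elif chain with `any(x in asset_upper for x in [...])`
def get_asset_class_py (asset : String) : String :=
  let asset_upper := PySem.Str.upper asset
  if ["BTC", "ETH", "SOL"].any (fun x => PySem.Str.isIn x asset_upper) then
    "major_crypto"
  else if ["DOGE", "SHIB", "PEPE"].any (fun x => PySem.Str.isIn x asset_upper) then
    "meme"
  else if ["LINK", "UNI", "AAVE"].any (fun x => PySem.Str.isIn x asset_upper) then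
    "defi"
  else
    "altcoin"

-- ===== PORT B =====
-- B: one pass over the string; at each position look the 3- and 4-char windows up in a
-- keyword→priority dict and keep the best (lowest) priority seen; map it to the class at the end.
def pvKeywordPriority : PySem.Dict String Int :=
  PySem.Dict.ofList [("BTC", 0), ("ETH", 0), ("SOL", 0),
                     ("DOGE", 1), ("SHIB", 1), ("PEPE", 1),
                     ("LINK", 2), ("UNI", 2), ("AAVE", 2)]

def pvClassOf : PySem.Dict Int String :=
  PySem.Dict.ofList [(0, "major_crypto"), (1, "meme"), (2, "defi")]

def get_asset_class_py_alt (asset : String) : String :=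
  let u := PySem.Str.upper asset
  let best : Int :=
    (PySem.List.pyRange 0 (PySem.Str.len u) 1).foldl
      (fun best i =>
        [(3 : Int), 4].foldl
          (fun best w =>
            match PySem.Dict.get? pvKeywordPriority (PySem.Str.slice u (some i) (some (i + w))) with
            | some p => if p < best then p else best
            | none => best)
          best)
      3
  PySem.Dict.getD pvClassOf best "altcoin"

-- ===== PRECONDITION & SPEC =====
def Spec_get_asset_class_py (asset : String) (out : String) : Prop := out = get_asset_class_py_alt asset
instance (asset : String) (out : String) : Decidable (Spec_get_asset_class_py asset out) := by unfold Spec_get_asset_class_py; infer_instance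

-- ===== CLAIM =====
def Claim_equal_get_asset_class_py : Prop := ∀ (asset : String), Dom_get_asset_class_py asset → Spec_get_asset_class_py asset (get_asset_class_py asset)

-- ===== LEMMAS AND PROOFS =====

-- B's window at position i of width w
def pvWin (u : String) (i w : Int) : String := PySem.Str.slice u (some i) (some (i + w))

-- priority of a window: dict value, or 3 (no match)
def pvPg (s : String) : Int := (PySem.Dict.get? pvKeywordPriority s).getD 3

-- best priority obtainable at position i
def pvH (u : String) (i : Int) : Int := min (pvPg (pvWin u i 3)) (pvPg (pvWin u i 4))

lemma pvG_char (s : String) (p : Int) (h : PySem.Dict.get? pvKeywordPriority s = some p) :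
    p = 0 ∨ p = 1 ∨ p = 2 := by
  have hd : pvKeywordPriority = PySem.Dict.mk
      [("BTC", 0), ("ETH", 0), ("SOL", 0), ("DOGE", 1), ("SHIB", 1), ("PEPE", 1),
       ("LINK", 2), ("UNI", 2), ("AAVE", 2)] := by decide
  rw [hd] at h
  simp only [PySem.Dict.get?_mk_cons] at h
  split_ifs at h <;> simp_all [PySem.Dict.get?]

set_option maxRecDepth 8192 in
lemma pvG_eq_zero_iff (s : String) :
    PySem.Dict.get? pvKeywordPriority s = some 0 ↔ (s = "BTC" ∨ s = "ETH" ∨ s = "SOL") := by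
  have hd : pvKeywordPriority = PySem.Dict.mk
      [("BTC", 0), ("ETH", 0), ("SOL", 0), ("DOGE", 1), ("SHIB", 1), ("PEPE", 1),
       ("LINK", 2), ("UNI", 2), ("AAVE", 2)] := by decide
  rw [hd]
  simp only [PySem.Dict.get?_mk_cons, beq_iff_eq]
  split_ifs <;> simp_all [PySem.Dict.get?, eq_comm (b := s)]

set_option maxRecDepth 8192 in
lemma pvG_eq_one_iff (s : String) :
    PySem.Dict.get? pvKeywordPriority s = some 1 ↔ (s = "DOGE" ∨ s = "SHIB" ∨ s = "PEPE") := by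
  have hd : pvKeywordPriority = PySem.Dict.mk
      [("BTC", 0), ("ETH", 0), ("SOL", 0), ("DOGE", 1), ("SHIB", 1), ("PEPE", 1),
       ("LINK", 2), ("UNI", 2), ("AAVE", 2)] := by decide
  rw [hd]
  simp only [PySem.Dict.get?_mk_cons, beq_iff_eq]
  split_ifs <;> simp_all [PySem.Dict.get?, eq_comm (b := s)]

set_option maxRecDepth 8192 in
lemma pvG_eq_two_iff (s : String) :
    PySem.Dict.get? pvKeywordPriority s = some 2 ↔ (s = "LINK" ∨ s = "UNI" ∨ s = "AAVE") := by
  have hd : pvKeywordPriority = PySem.Dict.mk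
      [("BTC", 0), ("ETH", 0), ("SOL", 0), ("DOGE", 1), ("SHIB", 1), ("PEPE", 1),
       ("LINK", 2), ("UNI", 2), ("AAVE", 2)] := by decide
  rw [hd]
  simp only [PySem.Dict.get?_mk_cons, beq_iff_eq]
  split_ifs <;> simp_all [PySem.Dict.get?, eq_comm (b := s)]

lemma pvPg_nonneg (s : String) : 0 ≤ pvPg s := by
  unfold pvPg
  cases h : PySem.Dict.get? pvKeywordPriority s with
  | none => simp
  | some p => rcases pvG_char s p h with h' | h' | h' <;> simp [h']

lemma pvH_nonneg (u : String) (i : Int) : 0 ≤ pvH u i :=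
  le_min (pvPg_nonneg _) (pvPg_nonneg _)

-- the inner fold over [3,4] is a min-update with pvH
lemma inner_eq (u : String) (i best : Int) (hb : best ≤ 3) :
    [(3 : Int), 4].foldl
      (fun best w =>
        match PySem.Dict.get? pvKeywordPriority (PySem.Str.slice u (some i) (some (i + w))) with
        | some p => if p < best then p else best
        | none => best)
      best = min best (pvH u i) := by
  simp only [List.foldl, pvH, pvWin, pvPg]
  cases h3 : PySem.Dict.get? pvKeywordPriority (PySem.Str.slice u (some i) (some (i + 3))) with
  | none =>
    cases h4 : PySem.Dict.get? pvKeywordPriority (PySem.Str.slice u (some i) (some (i + 4))) with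
    | none => simp [min_def]; omega
    | some p =>
      have := pvG_char _ _ h4
      simp only [Option.getD_some, Option.getD_none, min_def]
      split_ifs <;> omega
  | some p =>
    have hp := pvG_char _ _ h3
    cases h4 : PySem.Dict.get? pvKeywordPriority (PySem.Str.slice u (some i) (some (i + 4))) with
    | none =>
      simp only [Option.getD_some, Option.getD_none, min_def]
      split_ifs <;> omega
    | some q =>
      have hq := pvG_char _ _ h4
      simp only [Option.getD_some, min_def]
      split_ifs <;> omega

-- the outer fold equals the min-fold of pvH, as long as the accumulator is ≤ 3
lemma outer_eq (u : String) (L : List Int) (b : Int) (hb : b ≤ 3) :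
    L.foldl
      (fun best i =>
        [(3 : Int), 4].foldl
          (fun best w =>
            match PySem.Dict.get? pvKeywordPriority (PySem.Str.slice u (some i) (some (i + w))) with
            | some p => if p < best then p else best
            | none => best)
          best)
      b = L.foldl (fun best i => min best (pvH u i)) b := by
  induction L generalizing b with
  | nil => rfl
  | cons x xs ih =>
    rw [List.foldl_cons]
    conv_rhs => rw [List.foldl_cons]
    rw [inner_eq u x b hb]
    exact ih _ (le_trans (min_le_left _ _) hb)

lemma minfold_lb (u : String) (L : List Int) (b r : Int) (hb : r ≤ b)
    (hh : ∀ i ∈ L, r ≤ pvH u i) :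
    r ≤ L.foldl (fun best i => min best (pvH u i)) b := by
  induction L generalizing b with
  | nil => exact hb
  | cons x xs ih =>
    exact ih _ (le_min hb (hh x (by simp))) (fun i hi => hh i (by simp [hi]))

lemma minfold_le_iff (u : String) (L : List Int) (b r : Int) :
    L.foldl (fun best i => min best (pvH u i)) b ≤ r ↔ (b ≤ r ∨ ∃ i ∈ L, pvH u i ≤ r) := by
  induction L generalizing b with
  | nil => simp
  | cons x xs ih =>
    simp only [List.foldl, ih, min_le_iff, List.mem_cons]
    constructor
    · rintro (⟨h | h⟩ | ⟨i, hi, h⟩)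
      · exact Or.inl h
      · exact Or.inr ⟨x, Or.inl rfl, h⟩
      · exact Or.inr ⟨i, Or.inr hi, h⟩
    · rintro (h | ⟨i, rfl | hi, h⟩)
      · exact Or.inl (Or.inl h)
      · exact Or.inl (Or.inr h)
      · exact Or.inr ⟨i, hi, h⟩

-- a slice is a substring
lemma win_isIn (u k : String) (i w : Int) (h : pvWin u i w = k) :
    PySem.Str.isIn k u = true := by
  rw [PySem.Str.isIn_iff_infix]
  have : k.toList = PySem.List.slice u.toList (some i) (some (i + w)) := by
    rw [← h]; simp [pvWin, PySem.Str.toList_slice]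
  rw [this]
  simp only [PySem.List.slice]
  exact (List.take_prefix _ _).isInfix.trans (List.drop_suffix _ _).isInfix

-- a contained keyword is some window of its own length
lemma isIn_win (u k : String) (hk : k.toList ≠ []) (h : PySem.Str.isIn k u = true) :
    ∃ i ∈ PySem.List.pyRange 0 (PySem.Str.len u) 1,
      pvWin u i (k.toList.length : Int) = k := by
  rw [show PySem.Str.isIn k u = PySem.Chars.isIn k.toList u.toList from rfl,
      ← PySem.Chars.exists_prefix_drop_iff_isIn] at h
  obtain ⟨j, hj⟩ := h
  have hjlt : j < u.toList.length := by
    rcases Nat.lt_or_ge j u.toList.length with hlt | hge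
    · exact hlt
    · exfalso
      rw [List.drop_eq_nil_of_le hge] at hj
      exact hk (List.prefix_nil.mp hj)
  refine ⟨(j : Int), ?_, ?_⟩
  · rw [PySem.List.mem_pyRange_one]
    constructor
    · exact Int.natCast_nonneg j
    · have : PySem.Str.len u = (u.toList.length : Int) := by
        simp [PySem.Str.len_eq]
      rw [this]; exact_mod_cast hjlt
  · rw [← String.toList_inj]
    simp only [pvWin, PySem.Str.toList_slice, PySem.Chars.slice_eq_listSlice]
    rw [show ((j : Int) + (k.toList.length : Int)) = ((j : Int) + ((k.toList.length : Nat) : Int)) from rfl,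
        PySem.List.slice_natCast_add]
    exact (List.prefix_iff_eq_take.mp hj).symm

-- the A-side condition for one priority class, as a window condition
lemma rank_iff (u : String) (r : Int) (K : List String)
    (hK : ∀ s, PySem.Dict.get? pvKeywordPriority s = some r ↔ s ∈ K)
    (hlen : ∀ k ∈ K, (k.toList.length : Int) = 3 ∨ (k.toList.length : Int) = 4) :
    (∃ i ∈ PySem.List.pyRange 0 (PySem.Str.len u) 1,
        PySem.Dict.get? pvKeywordPriority (pvWin u i 3) = some r ∨
        PySem.Dict.get? pvKeywordPriority (pvWin u i 4) = some r)
      ↔ ∃ k ∈ K, PySem.Str.isIn k u = true := by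
  constructor
  · rintro ⟨i, _, h | h⟩
    · exact ⟨pvWin u i 3, (hK _).mp h, win_isIn u _ i 3 rfl⟩
    · exact ⟨pvWin u i 4, (hK _).mp h, win_isIn u _ i 4 rfl⟩
  · rintro ⟨k, hkK, hin⟩
    have hk : k.toList ≠ [] := by
      intro hnil
      rcases hlen k hkK with h | h <;> rw [hnil] at h <;> simp at h
    obtain ⟨i, hi, hwin⟩ := isIn_win u k hk hin
    rcases hlen k hkK with h | h
    · exact ⟨i, hi, Or.inl (by rw [show (3 : Int) = (k.toList.length : Int) from h.symm, hwin]; exact (hK k).mpr hkK)⟩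
    · exact ⟨i, hi, Or.inr (by rw [show (4 : Int) = (k.toList.length : Int) from h.symm, hwin]; exact (hK k).mpr hkK)⟩

-- pvH u i ≤ r, for r = 0,1,2, means some window carries priority ≤ r
lemma pvH_le_iff (u : String) (i r : Int) (hr0 : 0 ≤ r) (hr : r < 3) :
    pvH u i ≤ r ↔
      (∃ p ≤ r, PySem.Dict.get? pvKeywordPriority (pvWin u i 3) = some p ∨
                PySem.Dict.get? pvKeywordPriority (pvWin u i 4) = some p) := by
  unfold pvH
  rw [min_le_iff]
  constructor
  · rintro (h | h)
    · unfold pvPg at h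
      cases h3 : PySem.Dict.get? pvKeywordPriority (pvWin u i 3) with
      | none => rw [h3] at h; simp at h; omega
      | some p => rw [h3] at h; simp at h; exact ⟨p, h, Or.inl rfl⟩
    · unfold pvPg at h
      cases h4 : PySem.Dict.get? pvKeywordPriority (pvWin u i 4) with
      | none => rw [h4] at h; simp at h; omega
      | some p => rw [h4] at h; simp at h; exact ⟨p, h, Or.inr rfl⟩
  · rintro ⟨p, hp, h | h⟩
    · exact Or.inl (by unfold pvPg; rw [h]; simpa using hp)
    · exact Or.inr (by unfold pvPg; rw [h]; simpa using hp)

-- ===== VERDICT =====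
theorem get_asset_class_py_spec : Claim_equal_get_asset_class_py := by
  intro asset _
  unfold Spec_get_asset_class_py
  simp only [get_asset_class_py, get_asset_class_py_alt]
  rw [outer_eq (PySem.Str.upper asset) _ 3 (by norm_num)]
  set u := PySem.Str.upper asset with hu
  set L := PySem.List.pyRange 0 (PySem.Str.len u) 1 with hL
  set best := L.foldl (fun best i => min best (pvH u i)) 3 with hbest
  have h0b : 0 ≤ best := minfold_lb u L 3 0 (by norm_num) (fun i _ => pvH_nonneg u i)
  have hb3 : best ≤ 3 := (minfold_le_iff u L 3 3).mpr (Or.inl le_rfl)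
  have hK0 : ∀ s, PySem.Dict.get? pvKeywordPriority s = some 0 ↔ s ∈ (["BTC", "ETH", "SOL"] : List String) := by
    intro s; rw [pvG_eq_zero_iff]; simp
  have hK1 : ∀ s, PySem.Dict.get? pvKeywordPriority s = some 1 ↔ s ∈ (["DOGE", "SHIB", "PEPE"] : List String) := by
    intro s; rw [pvG_eq_one_iff]; simp
  have hK2 : ∀ s, PySem.Dict.get? pvKeywordPriority s = some 2 ↔ s ∈ (["LINK", "UNI", "AAVE"] : List String) := by
    intro s; rw [pvG_eq_two_iff]; simp
  have hlen0 : ∀ k ∈ (["BTC", "ETH", "SOL"] : List String), (k.toList.length : Int) = 3 ∨ (k.toList.length : Int) = 4 := by decide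
  have hlen1 : ∀ k ∈ (["DOGE", "SHIB", "PEPE"] : List String), (k.toList.length : Int) = 3 ∨ (k.toList.length : Int) = 4 := by decide
  have hlen2 : ∀ k ∈ (["LINK", "UNI", "AAVE"] : List String), (k.toList.length : Int) = 3 ∨ (k.toList.length : Int) = 4 := by decide
  have r0 := rank_iff u 0 _ hK0 hlen0
  have r1 := rank_iff u 1 _ hK1 hlen1
  have r2 := rank_iff u 2 _ hK2 hlen2
  have m0 : (∃ i ∈ L, pvH u i ≤ 0) ↔ (∃ k ∈ (["BTC", "ETH", "SOL"] : List String), PySem.Str.isIn k u = true) := by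
    rw [← r0]
    constructor
    · rintro ⟨i, hi, h⟩
      obtain ⟨p, hp, hg⟩ := (pvH_le_iff u i 0 le_rfl (by norm_num)).mp h
      have hpv : p = 0 := by
        rcases hg with hg | hg <;> rcases pvG_char _ _ hg with h' | h' | h' <;> omega
      exact ⟨i, hi, by rwa [hpv] at hg⟩
    · rintro ⟨i, hi, hg⟩
      exact ⟨i, hi, (pvH_le_iff u i 0 le_rfl (by norm_num)).mpr ⟨0, le_rfl, hg⟩⟩
  have m1 : (∃ i ∈ L, pvH u i ≤ 1) ↔
      ((∃ k ∈ (["BTC", "ETH", "SOL"] : List String), PySem.Str.isIn k u = true) ∨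
       (∃ k ∈ (["DOGE", "SHIB", "PEPE"] : List String), PySem.Str.isIn k u = true)) := by
    rw [← r0, ← r1]
    constructor
    · rintro ⟨i, hi, h⟩
      obtain ⟨p, hp, hg⟩ := (pvH_le_iff u i 1 (by norm_num) (by norm_num)).mp h
      have hpv : p = 0 ∨ p = 1 := by
        rcases hg with hg | hg <;> rcases pvG_char _ _ hg with h' | h' | h' <;> omega
      rcases hpv with rfl | rfl
      · exact Or.inl ⟨i, hi, hg⟩
      · exact Or.inr ⟨i, hi, hg⟩
    · rintro (⟨i, hi, hg⟩ | ⟨i, hi, hg⟩)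
      · exact ⟨i, hi, (pvH_le_iff u i 1 (by norm_num) (by norm_num)).mpr ⟨0, by norm_num, hg⟩⟩
      · exact ⟨i, hi, (pvH_le_iff u i 1 (by norm_num) (by norm_num)).mpr ⟨1, le_rfl, hg⟩⟩
  have m2 : (∃ i ∈ L, pvH u i ≤ 2) ↔
      ((∃ k ∈ (["BTC", "ETH", "SOL"] : List String), PySem.Str.isIn k u = true) ∨
       (∃ k ∈ (["DOGE", "SHIB", "PEPE"] : List String), PySem.Str.isIn k u = true) ∨
       (∃ k ∈ (["LINK", "UNI", "AAVE"] : List String), PySem.Str.isIn k u = true)) := by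
    rw [← r0, ← r1, ← r2]
    constructor
    · rintro ⟨i, hi, h⟩
      obtain ⟨p, hp, hg⟩ := (pvH_le_iff u i 2 (by norm_num) (by norm_num)).mp h
      have hpv : p = 0 ∨ p = 1 ∨ p = 2 := by
        rcases hg with hg | hg <;> rcases pvG_char _ _ hg with h' | h' | h' <;> omega
      rcases hpv with rfl | rfl | rfl
      · exact Or.inl ⟨i, hi, hg⟩
      · exact Or.inr (Or.inl ⟨i, hi, hg⟩)
      · exact Or.inr (Or.inr ⟨i, hi, hg⟩)
    · rintro (⟨i, hi, hg⟩ | ⟨i, hi, hg⟩ | ⟨i, hi, hg⟩)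
      · exact ⟨i, hi, (pvH_le_iff u i 2 (by norm_num) (by norm_num)).mpr ⟨0, by norm_num, hg⟩⟩
      · exact ⟨i, hi, (pvH_le_iff u i 2 (by norm_num) (by norm_num)).mpr ⟨1, by norm_num, hg⟩⟩
      · exact ⟨i, hi, (pvH_le_iff u i 2 (by norm_num) (by norm_num)).mpr ⟨2, le_rfl, hg⟩⟩
  cases hA0 : (["BTC", "ETH", "SOL"] : List String).any (fun x => PySem.Str.isIn x u) with
  | true =>
    have hle : best ≤ 0 :=
      (minfold_le_iff u L 3 0).mpr (Or.inr (m0.mpr (List.any_eq_true.mp hA0)))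
    have hbe : best = 0 := le_antisymm hle h0b
    simp only [hbe, if_true]
    decide
  | false =>
    have hn0 : ¬ best ≤ 0 := by
      intro hle
      rcases (minfold_le_iff u L 3 0).mp hle with h | h
      · omega
      · exact absurd (List.any_eq_true.mpr (m0.mp h)) (by rw [hA0]; simp)
    cases hA1 : (["DOGE", "SHIB", "PEPE"] : List String).any (fun x => PySem.Str.isIn x u) with
    | true =>
      have hle : best ≤ 1 :=
        (minfold_le_iff u L 3 1).mpr (Or.inr (m1.mpr (Or.inr (List.any_eq_true.mp hA1))))
      have hbe : best = 1 := by omega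
      simp only [hbe, if_true, Bool.false_eq_true, if_false]
      decide
    | false =>
      have hn1 : ¬ best ≤ 1 := by
        intro hle
        rcases (minfold_le_iff u L 3 1).mp hle with h | h
        · omega
        · rcases m1.mp h with h' | h'
          · exact absurd (List.any_eq_true.mpr h') (by rw [hA0]; simp)
          · exact absurd (List.any_eq_true.mpr h') (by rw [hA1]; simp)
      cases hA2 : (["LINK", "UNI", "AAVE"] : List String).any (fun x => PySem.Str.isIn x u) with
      | true =>
        have hle : best ≤ 2 :=
          (minfold_le_iff u L 3 2).mpr (Or.inr (m2.mpr (Or.inr (Or.inr (List.any_eq_true.mp hA2)))))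
        have hbe : best = 2 := by omega
        simp only [hbe, if_true, Bool.false_eq_true, if_false]
        decide
      | false =>
        have hn2 : ¬ best ≤ 2 := by
          intro hle
          rcases (minfold_le_iff u L 3 2).mp hle with h | h
          · omega
          · rcases m2.mp h with h' | h' | h'
            · exact absurd (List.any_eq_true.mpr h') (by rw [hA0]; simp)
            · exact absurd (List.any_eq_true.mpr h') (by rw [hA1]; simp)
            · exact absurd (List.any_eq_true.mpr h') (by rw [hA2]; simp)
        have hbe : best = 3 := by omega
        simp only [hbe, Bool.false_eq_true, if_false]
        decide
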